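-- pv_equiv track=rewrite | github.com/JohnPetros/leetcode | fatec/interfatec/2019/fase-2/primorial.py | is_primorial
-- ===== SOURCE A (Python) =====
-- def is_primorial(number):
--     primes = [2, 3, 5, 7, 11, 13, 17, 19, 23, 29, 31, 37, 41, 43, 47, 53, 59, 61]
--
--     # Primorials crescem rapidamente. O último primorial que cabe em 64 bits é o produto dos primeiros 17 primos.
--     # O produto dos primeiros 18 primos já excede 2^63 - 1.
--
--     current_product = 1
--     prime_index = 0
--
--     while current_product < number and prime_index < len(primes):
--         current_product *= primes[prime_index]
--         prime_index += 1
--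
--     return "S" if current_product == number else "N"
-- ===== SOURCE B (Python) =====
-- def is_primorial(number):
--     primes = [2, 3, 5, 7, 11, 13, 17, 19, 23, 29, 31, 37, 41, 43, 47, 53, 59, 61]
--     table = [1]
--     product = 1
--     for q in primes:
--         product *= q
--         table.append(product)
--     return "S" if number in table else "N"
-- ===== Notes on version B (the rewrite author's own statement) =====
-- stated objective: alternative
-- what changed: B precomputes the full table of partial prime products (one and each primorial) with one unconditional pass and answers by membership, replacing A's early-terminating while-loop that interleaves multiplication with the comparison.
import Mathlib
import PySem

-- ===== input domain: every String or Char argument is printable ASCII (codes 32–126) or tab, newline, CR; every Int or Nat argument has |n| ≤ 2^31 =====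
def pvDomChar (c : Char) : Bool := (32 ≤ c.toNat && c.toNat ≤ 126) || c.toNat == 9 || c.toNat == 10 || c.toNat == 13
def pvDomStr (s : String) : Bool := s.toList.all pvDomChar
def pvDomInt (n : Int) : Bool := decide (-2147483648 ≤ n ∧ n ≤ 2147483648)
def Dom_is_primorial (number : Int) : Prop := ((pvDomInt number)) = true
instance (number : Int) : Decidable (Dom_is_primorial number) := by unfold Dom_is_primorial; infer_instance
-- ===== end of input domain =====

-- B precomputes the full table of partial prime products in one unconditional pass and answers
-- by list membership, replacing A's early-terminating while-loop; alternative decomposition.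

-- ===== PORT A =====
-- the while loop: multiply by the next prime as long as current_product < number and primes remain
def pvLoopA (number : Int) (cp : Int) : List Int → Int
  | [] => cp
  | p :: ps => if cp < number then pvLoopA number (cp * p) ps else cp

def is_primorial (number : Int) : String :=
  let primes : List Int := [2, 3, 5, 7, 11, 13, 17, 19, 23, 29, 31, 37, 41, 43, 47, 53, 59, 61]
  if pvLoopA number 1 primes = number then "S" else "N"

-- ===== PORT B =====
def is_primorial_alt (number : Int) : String :=
  let primes : List Int := [2, 3, 5, 7, 11, 13, 17, 19, 23, 29, 31, 37, 41, 43, 47, 53, 59, 61]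
  let tp : List Int × Int :=
    primes.foldl (fun acc q => (acc.1 ++ [acc.2 * q], acc.2 * q)) ([1], 1)
  if number ∈ tp.1 then "S" else "N"

-- ===== PRECONDITION & SPEC =====
def Spec_is_primorial (number : Int) (out : String) : Prop := out = is_primorial_alt number
instance (number : Int) (out : String) : Decidable (Spec_is_primorial number out) := by unfold Spec_is_primorial; infer_instance

-- ===== CLAIM (what is proved, stated in full; the proofs are below) =====
def Claim_equal_is_primorial : Prop := ∀ (number : Int), Dom_is_primorial number → Spec_is_primorial number (is_primorial number)

-- ===== LEMMAS AND PROOFS =====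

-- the list of all partial products the while-loop can stop at
def pvProds (cp : Int) : List Int → List Int
  | [] => [cp]
  | p :: ps => cp :: pvProds (cp * p) ps

theorem pvLoopA_mem (n : Int) : ∀ (ps : List Int) (cp : Int), pvLoopA n cp ps ∈ pvProds cp ps := by
  intro ps
  induction ps with
  | nil => intro cp; simp [pvLoopA, pvProds]
  | cons p ps ih =>
      intro cp
      simp only [pvLoopA, pvProds]
      split_ifs with h
      · exact List.mem_cons_of_mem _ (ih (cp * p))
      · exact List.mem_cons_self

theorem pvProds_primes :
    pvProds 1 [2, 3, 5, 7, 11, 13, 17, 19, 23, 29, 31, 37, 41, 43, 47, 53, 59, 61] =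
    [1, 2, 6, 30, 210, 2310, 30030, 510510, 9699690, 223092870, 6469693230, 200560490130, 7420738134810, 304250263527210, 13082761331670030, 614889782588491410, 32589158477190044730, 1922760350154212639070, 117288381359406970983270] := by decide

set_option maxHeartbeats 1000000 in
theorem pvLoopA_eq_iff (n : Int) :
    (pvLoopA n 1 [2, 3, 5, 7, 11, 13, 17, 19, 23, 29, 31, 37, 41, 43, 47, 53, 59, 61] = n) ↔
    (n = 1 ∨ n = 2 ∨ n = 6 ∨ n = 30 ∨ n = 210 ∨ n = 2310 ∨ n = 30030 ∨ n = 510510 ∨ n = 9699690 ∨ n = 223092870 ∨ n = 6469693230 ∨ n = 200560490130 ∨ n = 7420738134810 ∨ n = 304250263527210 ∨ n = 13082761331670030 ∨ n = 614889782588491410 ∨ n = 32589158477190044730 ∨ n = 1922760350154212639070 ∨ n = 117288381359406970983270) := by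
  constructor
  · intro h
    have hm := pvLoopA_mem n [2, 3, 5, 7, 11, 13, 17, 19, 23, 29, 31, 37, 41, 43, 47, 53, 59, 61] 1
    rw [pvProds_primes, h] at hm
    simpa using hm
  · intro h
    rcases h with h | h | h | h | h | h | h | h | h | h | h | h | h | h | h | h | h | h | h <;> subst h <;> decide

theorem pvA_eq (n : Int) : is_primorial n = if (n = 1 ∨ n = 2 ∨ n = 6 ∨ n = 30 ∨ n = 210 ∨ n = 2310 ∨ n = 30030 ∨ n = 510510 ∨ n = 9699690 ∨ n = 223092870 ∨ n = 6469693230 ∨ n = 200560490130 ∨ n = 7420738134810 ∨ n = 304250263527210 ∨ n = 13082761331670030 ∨ n = 614889782588491410 ∨ n = 32589158477190044730 ∨ n = 1922760350154212639070 ∨ n = 117288381359406970983270) then "S" else "N" := by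
  unfold is_primorial
  simp only [pvLoopA_eq_iff]

set_option maxHeartbeats 1000000 in
theorem pvAlt_eq (n : Int) : is_primorial_alt n = if (n = 1 ∨ n = 2 ∨ n = 6 ∨ n = 30 ∨ n = 210 ∨ n = 2310 ∨ n = 30030 ∨ n = 510510 ∨ n = 9699690 ∨ n = 223092870 ∨ n = 6469693230 ∨ n = 200560490130 ∨ n = 7420738134810 ∨ n = 304250263527210 ∨ n = 13082761331670030 ∨ n = 614889782588491410 ∨ n = 32589158477190044730 ∨ n = 1922760350154212639070 ∨ n = 117288381359406970983270) then "S" else "N" := by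
  unfold is_primorial_alt
  norm_num [List.foldl, List.mem_cons]

-- ===== VERDICT (by name: the statement is the Claim_ definition above) =====
theorem is_primorial_spec : Claim_equal_is_primorial := by
  intro n _
  unfold Spec_is_primorial
  rw [pvA_eq, pvAlt_eq]
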